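-- pv_equiv track=rewrite | github.com/collinsakenga/codewars_solutions | 5 kyu/Find the safest places in town.py | advice
-- ===== SOURCE A (Python) =====
-- def advice(agents, n):
--     agents={(i[0], i[1]) for i in agents if 0<=i[0]<n and 0<=i[1]<n}
--     if n**2==len(agents):
--         return []
--     elif not agents:
--         return [(i, j) for i in range(n) for j in range(n)]
--     max_val=-1
--     res=[]
--     for i in range(n):
--         for j in range(n):
--             if (i,j) in agents:
--                 continue
--             diff=float("inf")
--             for k,l in agents:
--                 diff=min(diff, distance(i, j, k, l))
--                 if diff<max_val:
--                     break
--             if diff>max_val: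
--                 max_val=diff
--                 res=[(i, j)]
--             elif diff==max_val:
--                 res.append((i, j))
--     return res
--
-- def distance(i, j, k, l):
--     return abs(k-i)+abs(l-j)
-- ===== SOURCE B (Python) =====
-- def advice(agents, n):
--     occ = {(a, b) for a, b in agents if 0 <= a < n and 0 <= b < n}
--     if not occ:
--         return [(i, j) for i in range(n) for j in range(n)]
--     if len(occ) == n * n:
--         return []
--     INF = 2 * n
--     # forward sweep of the exact L1 distance transform:
--     # dist[i][j] = min Manhattan distance to an agent reachable by up/left moves
--     dist = []
--     for i in range(n):
--         row = []
--         for j in range(n):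
--             d = 0 if (i, j) in occ else INF
--             if j > 0 and row[j - 1] + 1 < d:
--                 d = row[j - 1] + 1
--             if i > 0 and dist[i - 1][j] + 1 < d:
--                 d = dist[i - 1][j] + 1
--             row.append(d)
--         dist.append(row)
--     # backward sweep completes the transform: dist[i][j] = min Manhattan distance to any agent
--     for i in range(n - 1, -1, -1):
--         for j in range(n - 1, -1, -1):
--             d = dist[i][j]
--             if j + 1 < n and dist[i][j + 1] + 1 < d:
--                 d = dist[i][j + 1] + 1
--             if i + 1 < n and dist[i + 1][j] + 1 < d:
--                 d = dist[i + 1][j] + 1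
--             dist[i][j] = d
--     best = max(max(row) for row in dist)
--     return [(i, j) for i in range(n) for j in range(n) if dist[i][j] == best]
-- ===== Notes on version B (the rewrite author's own statement) =====
-- stated objective: alternative
-- what changed: Replaces A's per-cell scan over all agents (minimum Manhattan distance recomputed from scratch for every cell, with an early-break prune) by a two-sweep L1 distance-transform dynamic program over the grid (forward top-left sweep, then backward bottom-right sweep), followed by one max pass and one filter pass.
import Mathlib
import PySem

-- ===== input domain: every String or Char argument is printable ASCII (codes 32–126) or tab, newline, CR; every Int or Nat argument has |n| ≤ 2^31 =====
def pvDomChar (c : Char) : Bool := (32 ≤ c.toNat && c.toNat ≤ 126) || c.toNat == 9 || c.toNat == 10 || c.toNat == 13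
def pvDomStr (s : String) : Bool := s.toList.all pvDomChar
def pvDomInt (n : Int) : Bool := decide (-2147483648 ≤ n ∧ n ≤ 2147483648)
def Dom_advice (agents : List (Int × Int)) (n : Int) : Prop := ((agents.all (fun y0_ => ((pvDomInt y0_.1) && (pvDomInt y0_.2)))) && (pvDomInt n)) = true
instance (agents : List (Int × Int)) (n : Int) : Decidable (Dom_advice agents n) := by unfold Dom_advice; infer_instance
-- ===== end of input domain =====

-- B replaces A's per-cell minimum over all agents by the classic two-sweep L1
-- distance-transform dynamic program (forward top-left sweep, then backward
-- bottom-right sweep), followed by one max pass and one filter pass.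
-- A iterates over a Python set with a break: its RESULT is independent of the
-- set's iteration order (the ports iterate insertion order).

-- ===== PORT A =====
def distance (i j k l : Int) : Int := |k - i| + |l - j|

-- the inner 'for k, l in agents: diff = min(diff, distance(i,j,k,l)); if diff < max_val: break'
-- loop; 'none' is diff == float("inf") (before the first iteration)
def aInner (i j maxVal : Int) : List (Int × Int) → Option Int → Option Int
  | [], diff => diff
  | (k, l) :: rest, diff =>
      let diff' : Int := match diff with
        | none => distance i j k l
        | some x => min x (distance i j k l)
      if diff' < maxVal then some diff' else aInner i j maxVal rest (some diff')

-- one iteration of the body of the nested 'for i … for j …' loop, state (max_val, res)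
def aStep (ag : PySem.Set (Int × Int)) (st : Int × List (Int × Int)) (c : Int × Int) : Int × List (Int × Int) :=
  if PySem.Set.contains ag c then st
  else
    match aInner c.1 c.2 st.1 ag none with
    | none => st   -- diff == inf with diff > max_val = -1 would set max_val = inf; unreachable: this branch runs only with a nonempty agents set
    | some diff =>
        if st.1 < diff then (diff, [c])
        else if diff = st.1 then (st.1, st.2 ++ [c])
        else st

def advice (agents : List (Int × Int)) (n : Int) : List (Int × Int) :=
  let ag : PySem.Set (Int × Int) :=
    PySem.Set.ofList (agents.filter (fun p => decide (0 ≤ p.1 ∧ p.1 < n ∧ 0 ≤ p.2 ∧ p.2 < n)))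
  if n ^ 2 = PySem.Set.len ag then []
  else if ag = [] then
    (PySem.List.pyRange 0 n 1).flatMap (fun i => (PySem.List.pyRange 0 n 1).map (fun j => (i, j)))
  else
    ((PySem.List.pyRange 0 n 1).foldl (fun st i =>
        (PySem.List.pyRange 0 n 1).foldl (fun st j => aStep ag st (i, j)) st) ((-1 : Int), [])).2

-- ===== PORT B =====
-- the body of the forward sweep: 'd = 0 if (i, j) in occ else INF; if j > 0 and …; if i > 0 and …'
-- (indices read under the 'j > 0' / 'i > 0' guards are in range, so pyGetD's default is never used)
def bFwdCell (occ : PySem.Set (Int × Int)) (n : Int) (dist : List (List Int)) (i : Int) (row : List Int) (j : Int) : Int :=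
  let d0 : Int := if PySem.Set.contains occ (i, j) then 0 else 2 * n
  let d1 : Int := if 0 < j ∧ PySem.List.pyGetD row (j - 1) 0 + 1 < d0
                  then PySem.List.pyGetD row (j - 1) 0 + 1 else d0
  if 0 < i ∧ PySem.List.pyGetD (PySem.List.pyGetD dist (i - 1) []) j 0 + 1 < d1
  then PySem.List.pyGetD (PySem.List.pyGetD dist (i - 1) []) j 0 + 1 else d1

-- 'row = []; for j in range(n): …; row.append(d)'
def bFwdRow (occ : PySem.Set (Int × Int)) (n : Int) (dist : List (List Int)) (i : Int) : List Int :=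
  (PySem.List.pyRange 0 n 1).foldl (fun row j => row ++ [bFwdCell occ n dist i row j]) []

-- 'dist = []; for i in range(n): …; dist.append(row)'
def bFwd (occ : PySem.Set (Int × Int)) (n : Int) : List (List Int) :=
  (PySem.List.pyRange 0 n 1).foldl (fun dist i => dist ++ [bFwdRow occ n dist i]) []

-- the body of the backward sweep: 'd = dist[i][j]; if j + 1 < n and …; if i + 1 < n and …'
def bBwdCell (n : Int) (dist : List (List Int)) (i j : Int) : Int :=
  let d0 : Int := PySem.List.pyGetD (PySem.List.pyGetD dist i []) j 0
  let d1 : Int := if j + 1 < n ∧ PySem.List.pyGetD (PySem.List.pyGetD dist i []) (j + 1) 0 + 1 < d0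
                  then PySem.List.pyGetD (PySem.List.pyGetD dist i []) (j + 1) 0 + 1 else d0
  if i + 1 < n ∧ PySem.List.pyGetD (PySem.List.pyGetD dist (i + 1) []) j 0 + 1 < d1
  then PySem.List.pyGetD (PySem.List.pyGetD dist (i + 1) []) j 0 + 1 else d1

-- 'for j in range(n - 1, -1, -1): …; dist[i][j] = d'  (i, j ≥ 0 in these loops, so .toNat is exact)
def bBwdRow (n : Int) (dist : List (List Int)) (i : Int) : List (List Int) :=
  (PySem.List.pyRange (n - 1) (-1) (-1)).foldl
    (fun dist j => dist.set i.toNat ((PySem.List.pyGetD dist i []).set j.toNat (bBwdCell n dist i j))) dist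

-- 'for i in range(n - 1, -1, -1): …'
def bBwd (n : Int) (dist : List (List Int)) : List (List Int) :=
  (PySem.List.pyRange (n - 1) (-1) (-1)).foldl (fun dist i => bBwdRow n dist i) dist

def advice_alt (agents : List (Int × Int)) (n : Int) : List (Int × Int) :=
  let occ : PySem.Set (Int × Int) :=
    PySem.Set.ofList (agents.filter (fun p => decide (0 ≤ p.1 ∧ p.1 < n ∧ 0 ≤ p.2 ∧ p.2 < n)))
  if occ = [] then
    (PySem.List.pyRange 0 n 1).flatMap (fun i => (PySem.List.pyRange 0 n 1).map (fun j => (i, j)))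
  else if PySem.Set.len occ = n * n then []
  else
    let dist2 : List (List Int) := bBwd n (bFwd occ n)
    -- 'best = max(max(row) for row in dist)': here n ≥ 1, so no row is empty and max never
    -- raises; the '.getD 0' defaults are unreachable
    let best : Int := (PySem.List.max? (dist2.map (fun row => (PySem.List.max? row (fun x => x)).getD 0)) (fun x => x)).getD 0
    (PySem.List.pyRange 0 n 1).flatMap (fun i =>
      ((PySem.List.pyRange 0 n 1).map (fun j => (i, j))).filter (fun c =>
        PySem.List.pyGetD (PySem.List.pyGetD dist2 c.1 []) c.2 0 == best))

-- ===== PRECONDITION & SPEC =====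
def Spec_advice (agents : List (Int × Int)) (n : Int) (out : List (Int × Int)) : Prop := out = advice_alt agents n
instance (agents : List (Int × Int)) (n : Int) (out : List (Int × Int)) : Decidable (Spec_advice agents n out) := by unfold Spec_advice; infer_instance

-- ===== CLAIM (what is proved, stated in full; the proofs are below) =====
def Claim_equal_advice : Prop := ∀ (agents : List (Int × Int)) (n : Int), Dom_advice agents n → Spec_advice agents n (advice agents n)

-- ===== LEMMAS AND PROOFS =====

-- the minimum Manhattan distance from cell c to the agents in ag ('0' unreachable for ag ≠ [])
def pvDmin (ag : List (Int × Int)) (c : Int × Int) : Int :=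
  (PySem.List.min? (ag.map (fun p => |p.1 - c.1| + |p.2 - c.2|)) (fun x => x)).getD 0

-- the grid cells in row-major order
def pvGrid (n : Int) : List (Int × Int) :=
  (PySem.List.pyRange 0 n 1).flatMap (fun i => (PySem.List.pyRange 0 n 1).map (fun j => (i, j)))

-- running maximum of pvDmin over the non-agent cells of L, started at -1
def pvMax (ag : PySem.Set (Int × Int)) (L : List (Int × Int)) : Int :=
  (L.filter (fun c => !(PySem.Set.contains ag c))).foldl (fun a c => max a (pvDmin ag c)) (-1)

-- ===== B-side mathematical model: the two DP sweeps as recursive functions =====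

def pvBase (occ : List (Int × Int)) (n : Int) (i j : Nat) : Int :=
  if PySem.Set.contains occ ((i : Int), (j : Int)) then 0 else 2 * n

-- value of cell (i, j) after the forward sweep
def pvF (occ : List (Int × Int)) (n : Int) : Nat → Nat → Int
  | 0, 0 => pvBase occ n 0 0
  | 0, j+1 => min (pvBase occ n 0 (j+1)) (pvF occ n 0 j + 1)
  | i+1, 0 => min (pvBase occ n (i+1) 0) (pvF occ n i 0 + 1)
  | i+1, j+1 => min (min (pvBase occ n (i+1) (j+1)) (pvF occ n (i+1) j + 1)) (pvF occ n i (j+1) + 1)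

-- value of cell (i, j) after the backward sweep
def pvG (occ : List (Int × Int)) (n : Int) (i j : Nat) : Int :=
  if _hj : j + 1 < n.toNat then
    if _hi : i + 1 < n.toNat then
      min (min (pvF occ n i j) (pvG occ n i (j+1) + 1)) (pvG occ n (i+1) j + 1)
    else min (pvF occ n i j) (pvG occ n i (j+1) + 1)
  else
    if _hi : i + 1 < n.toNat then min (pvF occ n i j) (pvG occ n (i+1) j + 1)
    else pvF occ n i j
termination_by (n.toNat - i) + (n.toNat - j)
decreasing_by all_goals omega

def pvFrow (occ : List (Int × Int)) (n : Int) (i : Nat) : List Int :=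
  (List.range n.toNat).map (pvF occ n i)

def pvGrow (occ : List (Int × Int)) (n : Int) (i : Nat) : List Int :=
  (List.range n.toNat).map (pvG occ n i)

-- ===== A-side lemmas (characterising A's loop) =====

theorem pvFoldMin_le (l : List (Int × Int)) (i j a : Int) :
    l.foldl (fun x p => min x (distance i j p.1 p.2)) a ≤ a := by
  have h := (PySem.List.foldl_min_le (l.map (fun p => distance i j p.1 p.2)) a).1
  rwa [List.foldl_map] at h

theorem pvInner_some (l : List (Int × Int)) (i j M a : Int) :
    ∃ v, aInner i j M l (some a) = some v ∧
      (v = l.foldl (fun x p => min x (distance i j p.1 p.2)) a ∨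
        (v < M ∧ l.foldl (fun x p => min x (distance i j p.1 p.2)) a ≤ v)) := by
  induction l generalizing a with
  | nil => exact ⟨a, rfl, Or.inl rfl⟩
  | cons q rest ih =>
    obtain ⟨k, l⟩ := q
    simp only [aInner, List.foldl_cons]
    by_cases hb : min a (distance i j k l) < M
    · refine ⟨min a (distance i j k l), by simp [hb], Or.inr ⟨hb, pvFoldMin_le _ _ _ _⟩⟩
    · simpa [hb] using ih (min a (distance i j k l))

theorem pvInner_none (q : Int × Int) (rest : List (Int × Int)) (i j M : Int) :
    ∃ v, aInner i j M (q :: rest) none = some v ∧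
      (v = rest.foldl (fun x p => min x (distance i j p.1 p.2)) (distance i j q.1 q.2) ∨
        (v < M ∧ rest.foldl (fun x p => min x (distance i j p.1 p.2)) (distance i j q.1 q.2) ≤ v)) := by
  obtain ⟨k, l⟩ := q
  simp only [aInner]
  by_cases hb : distance i j k l < M
  · exact ⟨distance i j k l, by simp [hb], Or.inr ⟨hb, pvFoldMin_le _ _ _ _⟩⟩
  · simpa [hb] using pvInner_some rest i j M (distance i j k l)

theorem pvDmin_cons (q : Int × Int) (qs : List (Int × Int)) (c : Int × Int) :
    pvDmin (q :: qs) c = qs.foldl (fun x p => min x (distance c.1 c.2 p.1 p.2)) (distance c.1 c.2 q.1 q.2) := by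
  simp only [pvDmin, List.map_cons, PySem.List.min?_id_cons, Option.getD_some, List.foldl_map]
  rfl

theorem pvDmin_nonneg (ag : List (Int × Int)) (c : Int × Int) : 0 ≤ pvDmin ag c := by
  unfold pvDmin
  rcases h : PySem.List.min? (ag.map (fun p => |p.1 - c.1| + |p.2 - c.2|)) (fun x => x) with _ | v
  · rw [h]; rfl
  · rw [h]
    have hm := PySem.List.min?_mem h
    simp only [List.mem_map] at hm
    obtain ⟨p, _, hp⟩ := hm
    simp only [Option.getD_some, ← hp]
    positivity

theorem pvStep_eq (ag : PySem.Set (Int × Int)) (hag : ag ≠ []) (M : Int) (R : List (Int × Int)) (c : Int × Int) :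
    aStep ag (M, R) c =
      if PySem.Set.contains ag c then (M, R)
      else if M < pvDmin ag c then (pvDmin ag c, [c])
      else if pvDmin ag c = M then (M, R ++ [c])
      else (M, R) := by
  obtain ⟨q, qs, rfl⟩ : ∃ q qs, ag = q :: qs := by
    cases ag with | nil => exact absurd rfl hag | cons q qs => exact ⟨q, qs, rfl⟩
  unfold aStep
  by_cases hc : PySem.Set.contains (q :: qs) c = true
  · rw [if_pos hc, if_pos hc]
  · rw [if_neg hc, if_neg hc]
    obtain ⟨v, hv, hcase⟩ := pvInner_none q qs c.1 c.2 M
    rw [hv]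
    rcases hcase with h | ⟨hlt, hle⟩
    · rw [pvDmin_cons, ← h]
    · rw [pvDmin_cons] at *
      have h1 : ¬ M < v := not_lt.mpr hlt.le
      have h2 : v ≠ M := ne_of_lt hlt
      have h3 : ¬ M < qs.foldl (fun x p => min x (distance c.1 c.2 p.1 p.2)) (distance c.1 c.2 q.1 q.2) :=
        not_lt.mpr (hle.trans hlt.le)
      have h4 : qs.foldl (fun x p => min x (distance c.1 c.2 p.1 p.2)) (distance c.1 c.2 q.1 q.2) ≠ M :=
        ne_of_lt (lt_of_le_of_lt hle hlt)
      simp [h1, h2, h3, h4]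

theorem pvMax_bound (ag : PySem.Set (Int × Int)) (L : List (Int × Int)) :
    ∀ e ∈ L.filter (fun c => !(PySem.Set.contains ag c)), pvDmin ag e ≤ pvMax ag L :=
  (PySem.List.le_foldl_max_int (L.filter (fun c => !(PySem.Set.contains ag c))) (pvDmin ag) (-1)).2

theorem pvLoop (ag : PySem.Set (Int × Int)) (hag : ag ≠ []) (L : List (Int × Int)) :
    L.foldl (aStep ag) ((-1 : Int), ([] : List (Int × Int))) =
      (pvMax ag L,
        (L.filter (fun c => !(PySem.Set.contains ag c))).filter
          (fun c => decide (pvDmin ag c = pvMax ag L))) := by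
  induction L using List.reverseRecOn with
  | nil => simp [pvMax]
  | append_singleton L c ih =>
    rw [List.foldl_append, ih, List.foldl_cons, List.foldl_nil]
    by_cases hc : PySem.Set.contains ag c = true
    · have hc' : c ∈ ag := by simpa using hc
      have hMax : pvMax ag (L ++ [c]) = pvMax ag L := by
        simp [pvMax, List.filter_append, hc']
      rw [pvStep_eq ag hag, if_pos hc, hMax, List.filter_append]
      simp [hc']
    · have hc' : c ∉ ag := by simpa using hc
      have hfil : (L ++ [c]).filter (fun c => !(PySem.Set.contains ag c))
          = L.filter (fun c => !(PySem.Set.contains ag c)) ++ [c] := by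
        simp [List.filter_append, hc']
      have hMax : pvMax ag (L ++ [c]) = max (pvMax ag L) (pvDmin ag c) := by
        rw [pvMax, hfil, List.foldl_append]; rfl
      rw [pvStep_eq ag hag, if_neg hc, hfil]
      rcases lt_trichotomy (pvMax ag L) (pvDmin ag c) with h | h | h
      · rw [if_pos h, hMax, max_eq_right h.le]
        have hnil : (L.filter (fun c => !(PySem.Set.contains ag c))).filter
            (fun e => decide (pvDmin ag e = pvDmin ag c)) = [] := by
          rw [List.filter_eq_nil_iff]
          intro e he
          have := (pvMax_bound ag L e he).trans_lt h
          simp [ne_of_lt this]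
        rw [List.filter_append, hnil]
        simp
      · rw [if_neg (by omega), if_pos h.symm, hMax, max_eq_left h.ge, List.filter_append]
        simp [h.symm]
      · rw [if_neg (by omega), if_neg (by omega), hMax, max_eq_left h.le]
        rw [List.filter_append]
        have : ¬ (pvDmin ag c = pvMax ag L) := by omega
        simp [this]

theorem pvRange0 (n : Int) : PySem.List.pyRange 0 n 1 = List.map (fun k : Nat => (k : Int)) (List.range n.toNat) := by
  rcases le_or_gt 0 n with h | h
  · conv_lhs => rw [show n = (n.toNat : Int) from (Int.toNat_of_nonneg h).symm]
    exact PySem.List.pyRange_zero_natCast n.toNat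
  · have h0 : n.toNat = 0 := Int.toNat_of_nonpos h.le
    rw [h0]
    apply List.eq_nil_iff_forall_not_mem.mpr
    intro x hx
    have := PySem.List.mem_pyRange_one.mp hx
    omega

theorem pvRangeNodup (n : Int) : (PySem.List.pyRange 0 n 1).Nodup := by
  rw [pvRange0]
  exact List.Nodup.map (fun a b h => by exact_mod_cast h) List.nodup_range

theorem pvGrid_mem (n : Int) (c : Int × Int) :
    c ∈ pvGrid n ↔ 0 ≤ c.1 ∧ c.1 < n ∧ 0 ≤ c.2 ∧ c.2 < n := by
  obtain ⟨a, b⟩ := c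
  simp only [pvGrid, List.mem_flatMap, List.mem_map, PySem.List.mem_pyRange_one, Prod.mk.injEq]
  constructor
  · rintro ⟨i, ⟨h1, h2⟩, j, ⟨h3, h4⟩, rfl, rfl⟩
    exact ⟨h1, h2, h3, h4⟩
  · rintro ⟨h1, h2, h3, h4⟩
    exact ⟨a, ⟨h1, h2⟩, b, ⟨h3, h4⟩, rfl, rfl⟩

theorem pvGrid_nodup (n : Int) : (pvGrid n).Nodup := by
  unfold pvGrid
  rw [List.nodup_flatMap]
  refine ⟨fun i _ => List.Nodup.map (fun x y h => by injection h) (pvRangeNodup n), ?_⟩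
  refine (pvRangeNodup n).imp ?_
  intro a b hab x hx hy
  simp only [List.mem_map] at hx hy
  obtain ⟨u, _, rfl⟩ := hx
  obtain ⟨v, _, h⟩ := hy
  exact hab (congrArg Prod.fst h).symm

theorem pvGrid_length (n : Int) : (pvGrid n).length = n.toNat * n.toNat := by
  simp only [pvGrid, pvRange0, List.length_flatMap, List.map_map, List.length_map,
    List.length_range]
  rw [show ((fun _ => n.toNat) ∘ fun k : Nat => (k : Int)) = Function.const Nat n.toNat from rfl]
  rw [List.map_const, List.sum_replicate, List.length_range, smul_eq_mul]

theorem pvLen_eq (s : PySem.Set (Int × Int)) : PySem.Set.len s = (s.length : Int) := rfl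

theorem pvAg_sub (agents : List (Int × Int)) (n : Int) :
    ∀ p ∈ PySem.Set.ofList (agents.filter (fun p => decide (0 ≤ p.1 ∧ p.1 < n ∧ 0 ≤ p.2 ∧ p.2 < n))),
      p ∈ pvGrid n := by
  intro p hp
  rw [PySem.Set.mem_ofList, List.mem_filter] at hp
  rw [pvGrid_mem]
  simpa using hp.2

theorem pvFull_iff (agents : List (Int × Int)) (n : Int) (hn : 0 ≤ n) :
    ((pvGrid n).filter (fun c =>
        !(PySem.Set.contains (PySem.Set.ofList (agents.filter (fun p => decide (0 ≤ p.1 ∧ p.1 < n ∧ 0 ≤ p.2 ∧ p.2 < n)))) c)) = []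
      ↔ n ^ 2 = ((PySem.Set.ofList (agents.filter (fun p => decide (0 ≤ p.1 ∧ p.1 < n ∧ 0 ≤ p.2 ∧ p.2 < n)))).length : Int)) := by
  set ag := PySem.Set.ofList (agents.filter (fun p => decide (0 ≤ p.1 ∧ p.1 < n ∧ 0 ≤ p.2 ∧ p.2 < n))) with hagdef
  have hnodup : ag.Nodup := PySem.Set.nodup_ofList _
  have hsub : ag ⊆ pvGrid n := pvAg_sub agents n
  have hlen : ((pvGrid n).length : Int) = n ^ 2 := by
    rw [pvGrid_length]
    push_cast
    rw [Int.toNat_of_nonneg hn]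
    ring
  constructor
  · intro hfil
    have hgsub : pvGrid n ⊆ ag := by
      intro c hc
      have := List.filter_eq_nil_iff.mp hfil c hc
      simpa using this
    have hperm : (pvGrid n).Perm ag :=
      (List.subperm_of_subset (pvGrid_nodup n) hgsub).perm_of_length_le
        (List.Subperm.length_le (List.subperm_of_subset hnodup hsub))
    rw [← hlen, hperm.length_eq]
  · intro hl
    have hperm : ag.Perm (pvGrid n) :=
      (List.subperm_of_subset hnodup hsub).perm_of_length_le (by omega)
    rw [List.filter_eq_nil_iff]
    intro c hc
    have : c ∈ ag := (hperm.mem_iff).mpr hc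
    simp [this]

-- ===== B-side lemmas: the DP computes pvDmin =====

theorem pvMinIte (a b : Int) : (if b + 1 < a then b + 1 else a) = min a (b + 1) := by
  rw [min_def]; split_ifs <;> omega

theorem pvDmin_le_mem (ag : List (Int × Int)) (c : Int × Int) (p : Int × Int) (hp : p ∈ ag) :
    pvDmin ag c ≤ |p.1 - c.1| + |p.2 - c.2| := by
  unfold pvDmin
  rcases h : PySem.List.min? (ag.map (fun p => |p.1 - c.1| + |p.2 - c.2|)) (fun x => x) with _ | v
  · rw [PySem.List.min?_eq_none_iff, List.map_eq_nil_iff] at h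
    subst h; cases hp
  · have := PySem.List.min?_isMin h (|p.1 - c.1| + |p.2 - c.2|)
      (List.mem_map_of_mem hp)
    rw [h]
    simpa using this

theorem pvDmin_exists (ag : List (Int × Int)) (hag : ag ≠ []) (c : Int × Int) :
    ∃ p ∈ ag, pvDmin ag c = |p.1 - c.1| + |p.2 - c.2| := by
  unfold pvDmin
  rcases h : PySem.List.min? (ag.map (fun p => |p.1 - c.1| + |p.2 - c.2|)) (fun x => x) with _ | v
  · rw [PySem.List.min?_eq_none_iff, List.map_eq_nil_iff] at h
    exact absurd h hag
  · have hm := PySem.List.min?_mem h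
    simp only [List.mem_map] at hm
    obtain ⟨p, hp, hpe⟩ := hm
    exact ⟨p, hp, by rw [h, ← hpe]; rfl⟩

theorem pvDmin_lip (ag : List (Int × Int)) (hag : ag ≠ []) (c c' : Int × Int) :
    pvDmin ag c ≤ pvDmin ag c' + (|c.1 - c'.1| + |c.2 - c'.2|) := by
  obtain ⟨p, hp, he⟩ := pvDmin_exists ag hag c'
  have h1 := pvDmin_le_mem ag c p hp
  have t1 : |p.1 - c.1| ≤ |p.1 - c'.1| + |c'.1 - c.1| := abs_sub_le _ _ _
  have t2 : |p.2 - c.2| ≤ |p.2 - c'.2| + |c'.2 - c.2| := abs_sub_le _ _ _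
  have e1 : |c'.1 - c.1| = |c.1 - c'.1| := abs_sub_comm _ _
  have e2 : |c'.2 - c.2| = |c.2 - c'.2| := abs_sub_comm _ _
  linarith

theorem pvDmin_zero (ag : List (Int × Int)) (c : Int × Int) (hc : c ∈ ag) : pvDmin ag c = 0 := by
  have h1 := pvDmin_le_mem ag c c hc
  have h2 := pvDmin_nonneg ag c
  simp only [sub_self, abs_zero, add_zero] at h1
  omega

theorem pvDmin_pos (ag : List (Int × Int)) (hag : ag ≠ []) (c : Int × Int) (hc : c ∉ ag) :
    1 ≤ pvDmin ag c := by
  obtain ⟨p, hp, he⟩ := pvDmin_exists ag hag c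
  have hne : p ≠ c := fun h => hc (h ▸ hp)
  have h1 : p.1 ≠ c.1 ∨ p.2 ≠ c.2 := by
    by_contra h
    push Not at h
    exact hne (Prod.ext h.1 h.2)
  have a1 := abs_nonneg (p.1 - c.1)
  have a2 := abs_nonneg (p.2 - c.2)
  rcases h1 with h | h
  · have := Int.one_le_abs (z := p.1 - c.1) (by omega)
    omega
  · have := Int.one_le_abs (z := p.2 - c.2) (by omega)
    omega

-- one-step Lipschitz bounds on pvDmin in the four grid directions
theorem pvDmin_adj (ag : List (Int × Int)) (hag : ag ≠ []) (x y : Int) :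
    pvDmin ag (x, y + 1) ≤ pvDmin ag (x, y) + 1 ∧ pvDmin ag (x, y) ≤ pvDmin ag (x, y + 1) + 1 ∧
    pvDmin ag (x + 1, y) ≤ pvDmin ag (x, y) + 1 ∧ pvDmin ag (x, y) ≤ pvDmin ag (x + 1, y) + 1 := by
  refine ⟨?_, ?_, ?_, ?_⟩
  · simpa using pvDmin_lip ag hag (x, y + 1) (x, y)
  · simpa using pvDmin_lip ag hag (x, y) (x, y + 1)
  · simpa using pvDmin_lip ag hag (x + 1, y) (x, y)
  · simpa using pvDmin_lip ag hag (x, y) (x + 1, y)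

theorem pvF_lb (occ : List (Int × Int)) (n : Int) (hocc : occ ≠ []) (i j : Nat) :
    min (pvDmin occ ((i : Int), (j : Int))) (2 * n) ≤ pvF occ n i j := by
  induction i, j using pvF.induct with
  | case1 =>
    simp only [pvF]
    unfold pvBase
    split_ifs with hc
    · have h0 := pvDmin_zero occ _ ((PySem.Set.contains_iff _ _).mp hc)
      omega
    · omega
  | case2 j ih =>
    have adj := (pvDmin_adj occ hocc ((0:Nat) : Int) ((j:Nat) : Int)).1
    simp only [pvF]
    unfold pvBase
    push_cast at adj ih ⊢
    split_ifs with hc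
    · have h0 := pvDmin_zero occ _ ((PySem.Set.contains_iff _ _).mp hc)
      omega
    · omega
  | case3 i ih =>
    have adj := (pvDmin_adj occ hocc ((i:Nat) : Int) ((0:Nat) : Int)).2.2.1
    simp only [pvF]
    unfold pvBase
    push_cast at adj ih ⊢
    split_ifs with hc
    · have h0 := pvDmin_zero occ _ ((PySem.Set.contains_iff _ _).mp hc)
      omega
    · omega
  | case4 i j ih1 ih2 =>
    have adjL := (pvDmin_adj occ hocc (((i+1:Nat)) : Int) ((j:Nat) : Int)).1
    have adjU := (pvDmin_adj occ hocc ((i:Nat) : Int) (((j+1:Nat)) : Int)).2.2.1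
    simp only [pvF]
    unfold pvBase
    push_cast at adjL adjU ⊢
    push_cast at ih1 ih2
    split_ifs with hc
    · have h0 := pvDmin_zero occ _ ((PySem.Set.contains_iff _ _).mp hc)
      push_cast at h0
      omega
    · omega

theorem pvG_lb (occ : List (Int × Int)) (n : Int) (hocc : occ ≠ []) (i j : Nat) :
    min (pvDmin occ ((i : Int), (j : Int))) (2 * n) ≤ pvG occ n i j := by
  induction i, j using pvG.induct (n := n) with
  | case1 i j hj hi ih1 ih2 =>
    have hF := pvF_lb occ n hocc i j
    have adjR := (pvDmin_adj occ hocc ((i:Nat) : Int) ((j:Nat) : Int)).2.1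
    have adjD := (pvDmin_adj occ hocc ((i:Nat) : Int) ((j:Nat) : Int)).2.2.2
    rw [pvG, dif_pos hj, dif_pos hi]
    push_cast at adjR adjD ih1 ih2 ⊢
    omega
  | case2 i j hj hi ih =>
    have hF := pvF_lb occ n hocc i j
    have adjR := (pvDmin_adj occ hocc ((i:Nat) : Int) ((j:Nat) : Int)).2.1
    rw [pvG, dif_pos hj, dif_neg hi]
    push_cast at adjR ih ⊢
    omega
  | case3 i j hj hi ih =>
    have hF := pvF_lb occ n hocc i j
    have adjD := (pvDmin_adj occ hocc ((i:Nat) : Int) ((j:Nat) : Int)).2.2.2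
    rw [pvG, dif_neg hj, dif_pos hi]
    push_cast at adjD ih ⊢
    omega
  | case4 i j hj hi =>
    have hF := pvF_lb occ n hocc i j
    rw [pvG, dif_neg hj, dif_neg hi]
    exact hF

theorem pvF_le_base (occ : List (Int × Int)) (n : Int) (i j : Nat) :
    pvF occ n i j ≤ pvBase occ n i j := by
  cases i <;> cases j <;> simp only [pvF] <;> omega

theorem pvF_step_up (occ : List (Int × Int)) (n : Int) (i j : Nat) :
    pvF occ n (i+1) j ≤ pvF occ n i j + 1 := by
  cases j <;> simp only [pvF] <;> omega

theorem pvF_step_left (occ : List (Int × Int)) (n : Int) (i j : Nat) :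
    pvF occ n i (j+1) ≤ pvF occ n i j + 1 := by
  cases i <;> simp only [pvF] <;> omega

theorem pvF_le_diag (occ : List (Int × Int)) (n : Int) (k l a b : Nat) :
    pvF occ n (k+a) (l+b) ≤ pvF occ n k l + a + b := by
  induction a with
  | zero =>
    simp only [Nat.add_zero, Nat.cast_zero]
    induction b with
    | zero => simp
    | succ b ihb =>
      have hs := pvF_step_left occ n k (l+b)
      rw [show l + (b+1) = (l+b)+1 by omega]
      push_cast at ihb ⊢
      omega
  | succ a iha =>
    have hs := pvF_step_up occ n (k+a) (l+b)
    rw [show k + (a+1) = (k+a)+1 by omega]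
    push_cast at iha ⊢
    omega

theorem pvG_le_F (occ : List (Int × Int)) (n : Int) (i j : Nat) :
    pvG occ n i j ≤ pvF occ n i j := by
  rw [pvG]
  split_ifs <;> omega

theorem pvG_step_right (occ : List (Int × Int)) (n : Int) (i j : Nat) (hj : j + 1 < n.toNat) :
    pvG occ n i j ≤ pvG occ n i (j+1) + 1 := by
  rw [pvG, dif_pos hj]
  split_ifs <;> omega

theorem pvG_step_down (occ : List (Int × Int)) (n : Int) (i j : Nat) (hi : i + 1 < n.toNat) :
    pvG occ n i j ≤ pvG occ n (i+1) j + 1 := by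
  rw [pvG]
  by_cases hj : j + 1 < n.toNat
  · rw [dif_pos hj, dif_pos hi]; omega
  · rw [dif_neg hj, dif_pos hi]; omega

theorem pvG_chain_right (occ : List (Int × Int)) (n : Int) (i : Nat) (b : Nat) :
    ∀ j, j + b < n.toNat → pvG occ n i j ≤ pvG occ n i (j+b) + b := by
  induction b with
  | zero => intro j h; simp
  | succ b ih =>
    intro j h
    have h1 := pvG_step_right occ n i j (by omega)
    have h2 := ih (j+1) (by omega)
    rw [show (j+1)+b = j+(b+1) by omega] at h2
    push_cast at h2 ⊢
    omega

theorem pvG_chain_down (occ : List (Int × Int)) (n : Int) (j : Nat) (a : Nat) :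
    ∀ i, i + a < n.toNat → pvG occ n i j ≤ pvG occ n (i+a) j + a := by
  induction a with
  | zero => intro i h; simp
  | succ a ih =>
    intro i h
    have h1 := pvG_step_down occ n i j (by omega)
    have h2 := ih (i+1) (by omega)
    rw [show (i+1)+a = i+(a+1) by omega] at h2
    push_cast at h2 ⊢
    omega

theorem pvG_le_dist (occ : List (Int × Int)) (n : Int) (p : Int × Int) (hp : p ∈ occ)
    (hp1 : 0 ≤ p.1) (hp2 : p.1 < n) (hp3 : 0 ≤ p.2) (hp4 : p.2 < n)
    (i j : Nat) (hi : i < n.toNat) (_hj : j < n.toNat) :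
    pvG occ n i j ≤ |p.1 - (i : Int)| + |p.2 - (j : Int)| := by
  set K := p.1.toNat with hK
  set L := p.2.toNat with hL
  have hK1 : p.1 = (K : Int) := by omega
  have hL1 : p.2 = (L : Int) := by omega
  have hKN : K < n.toNat := by omega
  have hLN : L < n.toNat := by omega
  have hFKL : pvF occ n K L ≤ 0 := by
    have hb := pvF_le_base occ n K L
    have hc : PySem.Set.contains occ ((K : Int), (L : Int)) = true :=
      (PySem.Set.contains_iff _ _).mpr (by rw [← hK1, ← hL1]; exact hp)
    unfold pvBase at hb
    rw [if_pos hc] at hb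
    exact hb
  rcases le_or_gt K i with hKi | hKi <;> rcases le_or_gt L j with hLj | hLj
  · -- agent above-left: forward sweep alone reaches (i, j)
    have h1 := pvG_le_F occ n i j
    have h2 := pvF_le_diag occ n K L (i - K) (j - L)
    rw [Nat.add_sub_cancel' hKi, Nat.add_sub_cancel' hLj] at h2
    have e1 : |p.1 - (i : Int)| = (i : Int) - p.1 := by rw [abs_of_nonpos (show p.1 - (i : Int) ≤ 0 by omega)]; ring
    have e2 : |p.2 - (j : Int)| = (j : Int) - p.2 := by rw [abs_of_nonpos (show p.2 - (j : Int) ≤ 0 by omega)]; ring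
    omega
  · -- agent above-right: forward to (i, L), then leftwards in the backward sweep
    have h1 := pvG_chain_right occ n i (L - j) j (by omega)
    rw [Nat.add_sub_cancel' hLj.le] at h1
    have h2 := pvG_le_F occ n i L
    have h3 := pvF_le_diag occ n K L (i - K) 0
    rw [Nat.add_sub_cancel' hKi, Nat.add_zero] at h3
    have e1 : |p.1 - (i : Int)| = (i : Int) - p.1 := by rw [abs_of_nonpos (show p.1 - (i : Int) ≤ 0 by omega)]; ring
    have e2 : |p.2 - (j : Int)| = p.2 - (j : Int) := abs_of_nonneg (by omega)
    push_cast at h1 h3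
    omega
  · -- agent below-left: forward to (K, j), then upwards in the backward sweep
    have h1 := pvG_chain_down occ n j (K - i) i (by omega)
    rw [Nat.add_sub_cancel' hKi.le] at h1
    have h2 := pvG_le_F occ n K j
    have h3 := pvF_le_diag occ n K L 0 (j - L)
    rw [Nat.add_zero, Nat.add_sub_cancel' hLj] at h3
    have e1 : |p.1 - (i : Int)| = p.1 - (i : Int) := abs_of_nonneg (by omega)
    have e2 : |p.2 - (j : Int)| = (j : Int) - p.2 := by rw [abs_of_nonpos (show p.2 - (j : Int) ≤ 0 by omega)]; ring
    push_cast at h1 h3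
    omega
  · -- agent below-right: both moves in the backward sweep
    have h1 := pvG_chain_down occ n j (K - i) i (by omega)
    rw [Nat.add_sub_cancel' hKi.le] at h1
    have h2 := pvG_chain_right occ n K (L - j) j (by omega)
    rw [Nat.add_sub_cancel' hLj.le] at h2
    have h3 := pvG_le_F occ n K L
    have e1 : |p.1 - (i : Int)| = p.1 - (i : Int) := abs_of_nonneg (by omega)
    have e2 : |p.2 - (j : Int)| = p.2 - (j : Int) := abs_of_nonneg (by omega)
    omega

theorem pvG_eq_dmin (occ : List (Int × Int)) (n : Int) (hocc : occ ≠ [])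
    (hgrid : ∀ p ∈ occ, 0 ≤ p.1 ∧ p.1 < n ∧ 0 ≤ p.2 ∧ p.2 < n)
    (i j : Nat) (hi : i < n.toNat) (hj : j < n.toNat) :
    pvG occ n i j = pvDmin occ ((i : Int), (j : Int)) := by
  obtain ⟨p, hp, he⟩ := pvDmin_exists occ hocc ((i : Int), (j : Int))
  simp only at he
  obtain ⟨g1, g2, g3, g4⟩ := hgrid p hp
  have hub : pvG occ n i j ≤ pvDmin occ ((i : Int), (j : Int)) := by
    rw [he]
    exact pvG_le_dist occ n p hp g1 g2 g3 g4 i j hi hj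
  have hlb := pvG_lb occ n hocc i j
  have hsmall : pvDmin occ ((i : Int), (j : Int)) ≤ 2 * n - 2 := by
    rw [he]
    have a1 : |p.1 - (i : Int)| ≤ n - 1 := abs_le.mpr ⟨by omega, by omega⟩
    have a2 : |p.2 - (j : Int)| ≤ n - 1 := abs_le.mpr ⟨by omega, by omega⟩
    omega
  omega

-- ===== B-side lemmas: the port computes pvF / pvG =====

theorem pvSet_map_range {β : Type} (f : Nat → β) (N k : Nat) (_hk : k < N) (v : β) :
    ((List.range N).map f).set k v = (List.range N).map (fun x => if x = k then v else f x) := by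
  apply List.ext_getElem
  · simp
  · intro m h1 h2
    simp only [List.getElem_set, List.getElem_map, List.getElem_range]
    by_cases hm : k = m
    · subst hm; simp
    · simp [hm, Ne.symm hm]

theorem pvGetD_map_range {β : Type} (f : Nat → β) (N k : Nat) (hk : k < N) (d : β) :
    PySem.List.pyGetD ((List.range N).map f) (k : Int) d = f k := by
  rw [PySem.List.pyGetD_natCast, PySem.List.getD_map_range f N k d hk]

theorem pvFwdCell_eq (occ : List (Int × Int)) (n : Int) (i m : Nat) (hm : m < n.toNat) :
    bFwdCell occ n ((List.range i).map (pvFrow occ n)) (i : Int) ((List.range m).map (pvF occ n i)) (m : Int)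
      = pvF occ n i m := by
  simp only [bFwdCell]
  rcases i with _ | i' <;> rcases m with _ | m'
  · simp [pvF, pvBase]
  · have hg1 : (0:Int) < ((m'+1 : Nat) : Int) := by positivity
    have hg2 : ¬ ((0:Int) < ((0:Nat) : Int)) := by simp
    rw [show ((m'+1 : Nat) : Int) - 1 = ((m' : Nat) : Int) by push_cast; ring]
    rw [pvGetD_map_range (pvF occ n 0) (m'+1) m' (by omega)]
    simp only [eq_true hg1, true_and, eq_false hg2, false_and, if_false]
    rw [pvMinIte]
    simp [pvF, pvBase]
  · have hg1 : ¬ ((0:Int) < ((0:Nat) : Int)) := by simp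
    have hg2 : (0:Int) < ((i'+1 : Nat) : Int) := by positivity
    rw [show ((i'+1 : Nat) : Int) - 1 = ((i' : Nat) : Int) by push_cast; ring]
    rw [pvGetD_map_range (pvFrow occ n) (i'+1) i' (by omega)]
    unfold pvFrow
    rw [pvGetD_map_range (pvF occ n i') n.toNat 0 (by omega)]
    simp only [eq_true hg2, true_and, eq_false hg1, false_and, if_false]
    rw [pvMinIte]
    simp [pvF, pvBase]
  · have hg1 : (0:Int) < ((m'+1 : Nat) : Int) := by positivity
    have hg2 : (0:Int) < ((i'+1 : Nat) : Int) := by positivity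
    rw [show ((m'+1 : Nat) : Int) - 1 = ((m' : Nat) : Int) by push_cast; ring]
    rw [show ((i'+1 : Nat) : Int) - 1 = ((i' : Nat) : Int) by push_cast; ring]
    rw [pvGetD_map_range (pvF occ n (i'+1)) (m'+1) m' (by omega)]
    rw [pvGetD_map_range (pvFrow occ n) (i'+1) i' (by omega)]
    unfold pvFrow
    rw [pvGetD_map_range (pvF occ n i') n.toNat (m'+1) hm]
    simp only [eq_true hg1, true_and, eq_true hg2, true_and]
    rw [pvMinIte, pvMinIte]
    simp [pvF, pvBase, min_assoc]
  
theorem pvFwdRow_eq (occ : List (Int × Int)) (n : Int) (i : Nat) :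
    bFwdRow occ n ((List.range i).map (pvFrow occ n)) (i : Int) = pvFrow occ n i := by
  unfold bFwdRow pvFrow
  rw [pvRange0, List.foldl_map]
  suffices h : ∀ m, m ≤ n.toNat →
      List.foldl (fun row (k : Nat) => row ++ [bFwdCell occ n ((List.range i).map (pvFrow occ n)) (i : Int) row (k : Int)]) []
        (List.range m) = (List.range m).map (pvF occ n i) from h n.toNat le_rfl
  intro m hm
  induction m with
  | zero => simp
  | succ m ih =>
    rw [List.range_succ, List.foldl_append, ih (by omega), List.foldl_cons, List.foldl_nil,
      List.map_append]
    rw [pvFwdCell_eq occ n i m (by omega)]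
    simp

theorem pvFwd_eq (occ : List (Int × Int)) (n : Int) :
    bFwd occ n = (List.range n.toNat).map (pvFrow occ n) := by
  unfold bFwd
  rw [pvRange0, List.foldl_map]
  suffices h : ∀ m, m ≤ n.toNat →
      List.foldl (fun dist (k : Nat) => dist ++ [bFwdRow occ n dist (k : Int)]) []
        (List.range m) = (List.range m).map (pvFrow occ n) from h n.toNat le_rfl
  intro m hm
  induction m with
  | zero => simp
  | succ m ih =>
    rw [List.range_succ, List.foldl_append, ih (by omega), List.foldl_cons, List.foldl_nil,
      List.map_append]
    rw [pvFwdRow_eq occ n m]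
    simp

theorem pvG_unfold (occ : List (Int × Int)) (n : Int) (i j : Nat) :
    pvG occ n i j =
      (if i + 1 < n.toNat
       then min (if j + 1 < n.toNat then min (pvF occ n i j) (pvG occ n i (j+1) + 1) else pvF occ n i j)
                (pvG occ n (i+1) j + 1)
       else (if j + 1 < n.toNat then min (pvF occ n i j) (pvG occ n i (j+1) + 1) else pvF occ n i j)) := by
  rw [pvG]
  by_cases hj : j + 1 < n.toNat <;> by_cases hi : i + 1 < n.toNat <;> simp [hj, hi]

-- the 2-D state while the backward sweep is inside row i: rows below i are finished (pvG),
-- rows above are still forward values (pvF), row i is finished from column s on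
def pvMixD (occ : List (Int × Int)) (n : Int) (i s : Nat) : List (List Int) :=
  (List.range n.toNat).map (fun i' =>
    if i < i' then pvGrow occ n i'
    else if i' = i then (List.range n.toNat).map (fun j => if s ≤ j then pvG occ n i j else pvF occ n i j)
    else pvFrow occ n i')

theorem pvMixD_read (occ : List (Int × Int)) (n : Int) (i s : Nat) (hi : i < n.toNat) :
    PySem.List.pyGetD (pvMixD occ n i s) (i : Int) []
      = (List.range n.toNat).map (fun j => if s ≤ j then pvG occ n i j else pvF occ n i j) := by
  unfold pvMixD
  rw [pvGetD_map_range _ n.toNat i hi]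
  simp

theorem pvBwdCell_eq (occ : List (Int × Int)) (n : Int) (i j : Nat) (hi : i < n.toNat) (hj : j < n.toNat) :
    bBwdCell n (pvMixD occ n i (j+1)) (i : Int) (j : Int) = pvG occ n i j := by
  simp only [bBwdCell]
  rw [pvMixD_read occ n i (j+1) hi]
  rw [pvGetD_map_range _ n.toNat j hj]
  rw [if_neg (by omega : ¬ (j + 1 ≤ j))]
  by_cases hj1 : j + 1 < n.toNat
  · rw [show ((j:Int)) + 1 = ((j+1 : Nat) : Int) by push_cast; ring]
    rw [pvGetD_map_range _ n.toNat (j+1) hj1]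
    rw [if_pos (le_refl (j+1))]
    have hg1 : ((j+1 : Nat) : Int) < n := by omega
    simp only [eq_true hg1, true_and]
    rw [pvMinIte]
    by_cases hi1 : i + 1 < n.toNat
    · rw [show ((i:Int)) + 1 = ((i+1 : Nat) : Int) by push_cast; ring]
      unfold pvMixD
      rw [pvGetD_map_range _ n.toNat (i+1) hi1]
      rw [if_pos (Nat.lt_succ_self i)]
      unfold pvGrow
      rw [pvGetD_map_range _ n.toNat j hj]
      have hg2 : ((i+1 : Nat) : Int) < n := by omega
      simp only [eq_true hg2, true_and]
      rw [pvMinIte]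
      rw [pvG_unfold occ n i j, if_pos hi1, if_pos hj1]
    · have hg2 : ¬ ((i : Int) + 1 < n) := by omega
      simp only [eq_false hg2, false_and, if_false]
      rw [pvG_unfold occ n i j, if_neg hi1, if_pos hj1]
  · have hg1 : ¬ ((j : Int) + 1 < n) := by omega
    simp only [eq_false hg1, false_and, if_false]
    by_cases hi1 : i + 1 < n.toNat
    · rw [show ((i:Int)) + 1 = ((i+1 : Nat) : Int) by push_cast; ring]
      unfold pvMixD
      rw [pvGetD_map_range _ n.toNat (i+1) hi1]
      rw [if_pos (Nat.lt_succ_self i)]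
      unfold pvGrow
      rw [pvGetD_map_range _ n.toNat j hj]
      have hg2 : ((i+1 : Nat) : Int) < n := by omega
      simp only [eq_true hg2, true_and]
      rw [pvMinIte]
      rw [pvG_unfold occ n i j, if_pos hi1, if_neg hj1]
    · have hg2 : ¬ ((i : Int) + 1 < n) := by omega
      simp only [eq_false hg2, false_and, if_false]
      rw [pvG_unfold occ n i j, if_neg hi1, if_neg hj1]

theorem pvMixD_step (occ : List (Int × Int)) (n : Int) (i j : Nat) (hi : i < n.toNat) (hj : j < n.toNat) :
    (pvMixD occ n i (j+1)).set i ((PySem.List.pyGetD (pvMixD occ n i (j+1)) (i : Int) []).set j (pvG occ n i j))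
      = pvMixD occ n i j := by
  rw [pvMixD_read occ n i (j+1) hi]
  rw [pvSet_map_range _ n.toNat j hj]
  unfold pvMixD
  rw [pvSet_map_range _ n.toNat i hi]
  apply List.map_congr_left
  intro x hx
  rw [List.mem_range] at hx
  by_cases hxi : x = i
  · subst hxi
    rw [if_pos rfl, if_neg (lt_irrefl x), if_pos rfl]
    apply List.map_congr_left
    intro y hy
    rw [List.mem_range] at hy
    by_cases hyj : y = j
    · subst hyj; rw [if_pos rfl, if_pos (le_refl y)]
    · rw [if_neg hyj]
      by_cases h : j + 1 ≤ y
      · rw [if_pos h, if_pos (by omega)]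
      · rw [if_neg h, if_neg (by omega)]
  · rw [if_neg hxi]
    by_cases hix : i < x
    · rw [if_pos hix, if_pos hix]
    · rw [if_neg hix, if_neg hix, if_neg hxi, if_neg hxi]

theorem pvBwdRow_eq (occ : List (Int × Int)) (n : Int) (hn : 0 < n) (i : Nat) (hi : i < n.toNat) :
    bBwdRow n ((List.range n.toNat).map (fun i' => if i < i' then pvGrow occ n i' else pvFrow occ n i')) (i : Int)
      = (List.range n.toNat).map (fun i' => if i ≤ i' then pvGrow occ n i' else pvFrow occ n i') := by
  unfold bBwdRow
  rw [PySem.List.pyRange_neg_one, show n - 1 - -1 = n by ring, List.foldl_map]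
  have h0 : pvMixD occ n i n.toNat
      = (List.range n.toNat).map (fun i' => if i < i' then pvGrow occ n i' else pvFrow occ n i') := by
    unfold pvMixD
    apply List.map_congr_left; intro x hx
    rw [List.mem_range] at hx
    by_cases h1 : i < x
    · rw [if_pos h1, if_pos h1]
    · rw [if_neg h1, if_neg h1]
      by_cases h2 : x = i
      · subst h2
        rw [if_pos rfl]
        unfold pvFrow
        apply List.map_congr_left; intro y hy
        rw [List.mem_range] at hy
        rw [if_neg (by omega)]
      · rw [if_neg h2]
  suffices h : ∀ m, m ≤ n.toNat →
      List.foldl (fun dist (k : Nat) =>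
          dist.set (i : Int).toNat ((PySem.List.pyGetD dist (i : Int) []).set ((n - 1) - (k : Int)).toNat
            (bBwdCell n dist (i : Int) ((n - 1) - (k : Int)))))
        (pvMixD occ n i n.toNat) (List.range m)
      = pvMixD occ n i (n.toNat - m) by
    rw [← h0]
    rw [h n.toNat le_rfl, Nat.sub_self]
    unfold pvMixD
    apply List.map_congr_left; intro x hx
    rw [List.mem_range] at hx
    by_cases h1 : i < x
    · rw [if_pos h1, if_pos (by omega)]
    · by_cases h2 : x = i
      · rw [if_neg h1, if_pos h2, if_pos (by omega : i ≤ x)]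
        subst h2
        unfold pvGrow
        apply List.map_congr_left; intro y hy
        rw [if_pos (Nat.zero_le y)]
      · rw [if_neg h1, if_neg h2, if_neg (by omega)]
  intro m hm
  induction m with
  | zero => rw [List.range_zero, List.foldl_nil, Nat.sub_zero]
  | succ m ih =>
    rw [List.range_succ, List.foldl_append, ih (by omega), List.foldl_cons, List.foldl_nil]
    rw [show (n - 1) - ((m : Nat) : Int) = ((n.toNat - 1 - m : Nat) : Int) by omega]
    rw [Int.toNat_natCast, Int.toNat_natCast]
    rw [show n.toNat - m = (n.toNat - 1 - m) + 1 by omega]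
    rw [pvBwdCell_eq occ n i (n.toNat - 1 - m) hi (by omega)]
    rw [pvMixD_step occ n i (n.toNat - 1 - m) hi (by omega)]
    rw [show n.toNat - (m + 1) = n.toNat - 1 - m by omega]

theorem pvBwd_eq (occ : List (Int × Int)) (n : Int) (hn : 0 < n) :
    bBwd n (bFwd occ n) = (List.range n.toNat).map (pvGrow occ n) := by
  unfold bBwd
  rw [pvFwd_eq occ n]
  rw [PySem.List.pyRange_neg_one, show n - 1 - -1 = n by ring, List.foldl_map]
  suffices h : ∀ m, m ≤ n.toNat →
      List.foldl (fun dist (k : Nat) => bBwdRow n dist ((n - 1) - (k : Int)))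
        ((List.range n.toNat).map (pvFrow occ n)) (List.range m)
      = (List.range n.toNat).map (fun i' => if n.toNat - m ≤ i' then pvGrow occ n i' else pvFrow occ n i') by
    rw [h n.toNat le_rfl]
    apply List.map_congr_left; intro x hx
    rw [if_pos (by omega)]
  intro m hm
  induction m with
  | zero =>
    rw [List.range_zero, List.foldl_nil]
    apply List.map_congr_left; intro x hx
    rw [List.mem_range] at hx
    rw [if_neg (by omega)]
  | succ m ih =>
    rw [List.range_succ, List.foldl_append, ih (by omega), List.foldl_cons, List.foldl_nil]
    rw [show (n - 1) - ((m : Nat) : Int) = ((n.toNat - 1 - m : Nat) : Int) by omega]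
    have hstate : (List.range n.toNat).map (fun i' => if n.toNat - m ≤ i' then pvGrow occ n i' else pvFrow occ n i')
        = (List.range n.toNat).map (fun i' => if n.toNat - 1 - m < i' then pvGrow occ n i' else pvFrow occ n i') := by
      apply List.map_congr_left; intro x hx
      rw [List.mem_range] at hx
      by_cases h1 : n.toNat - m ≤ x
      · rw [if_pos h1, if_pos (by omega)]
      · rw [if_neg h1, if_neg (by omega)]
    rw [hstate]
    rw [pvBwdRow_eq occ n hn (n.toNat - 1 - m) (by omega)]
    apply List.map_congr_left; intro x hx
    rw [List.mem_range] at hx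
    by_cases h1 : n.toNat - 1 - m ≤ x
    · rw [if_pos h1, if_pos (by omega)]
    · rw [if_neg h1, if_neg (by omega)]

-- ===== assembly =====

theorem pvNestedFoldl {σ : Type} (l1 l2 : List Int) (g : σ → (Int × Int) → σ) (s : σ) :
    l1.foldl (fun st i => l2.foldl (fun st j => g st (i, j)) st) s
      = (l1.flatMap (fun i => l2.map (fun j => (i, j)))).foldl g s := by
  induction l1 generalizing s with
  | nil => rfl
  | cons i l1 ih =>
    simp only [List.foldl_cons, List.flatMap_cons, List.foldl_append, ih, List.foldl_map]

-- max(xs) of a nonempty list: a member that bounds every element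
theorem pvMaxD_spec (l : List Int) (hl : l ≠ []) :
    (PySem.List.max? l (fun x => x)).getD 0 ∈ l ∧
      ∀ y ∈ l, y ≤ (PySem.List.max? l (fun x => x)).getD 0 := by
  obtain ⟨x, t, rfl⟩ : ∃ x t, l = x :: t := by
    cases l with | nil => exact absurd rfl hl | cons a b => exact ⟨a, b, rfl⟩
  rw [PySem.List.max?_id_cons, Option.getD_some]
  have hb := PySem.List.le_foldl_max t x
  constructor
  · rcases PySem.List.foldl_max_mem t x with h | h
    · rw [h]; exact List.mem_cons_self
    · exact List.mem_cons_of_mem _ h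
  · intro y hy
    rcases List.mem_cons.mp hy with rfl | hy'
    · exact hb.1
    · exact hb.2 y hy'

theorem advice_eq (agents : List (Int × Int)) (n : Int) : advice agents n = advice_alt agents n := by
  simp only [advice, advice_alt]
  set ag := PySem.Set.ofList (agents.filter (fun p => decide (0 ≤ p.1 ∧ p.1 < n ∧ 0 ≤ p.2 ∧ p.2 < n))) with hagdef
  by_cases h2 : ag = []
  · by_cases hn0 : n ^ 2 = PySem.Set.len ag
    · rw [if_pos hn0, if_pos h2]
      have hn : n = 0 := by
        rw [h2, pvLen_eq] at hn0
        simp only [List.length_nil, Nat.cast_zero] at hn0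
        exact pow_eq_zero_iff (two_ne_zero) |>.mp hn0
      subst hn
      rw [show PySem.List.pyRange 0 0 1 = ([] : List Int) from PySem.List.pyRange_one_eq_nil le_rfl]
      rfl
    · rw [if_neg hn0, if_pos h2, if_pos h2]
  · have hsub := pvAg_sub agents n
    rw [← hagdef] at hsub
    have hgrid : ∀ p ∈ ag, 0 ≤ p.1 ∧ p.1 < n ∧ 0 ≤ p.2 ∧ p.2 < n :=
      fun p hp => (pvGrid_mem n p).mp (hsub p hp)
    have hn : 0 < n := by
      obtain ⟨p, hp⟩ := List.exists_mem_of_ne_nil ag h2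
      have := hgrid p hp; omega
    have hpow : n ^ 2 = n * n := sq n
    by_cases hful : n ^ 2 = PySem.Set.len ag
    · rw [if_pos hful, if_neg h2, if_pos (show PySem.Set.len ag = n * n by omega)]
    · rw [if_neg hful, if_neg h2, if_neg (show ¬ PySem.Set.len ag = n * n by omega)]
      -- both sides compute on the nonempty, not-full grid
      rw [pvNestedFoldl (PySem.List.pyRange 0 n 1) (PySem.List.pyRange 0 n 1) (aStep ag) ((-1 : Int), [])]
      rw [show ((PySem.List.pyRange 0 n 1).flatMap (fun i => (PySem.List.pyRange 0 n 1).map (fun j => (i, j)))) = pvGrid n from rfl]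
      rw [pvLoop ag h2 (pvGrid n)]
      rw [pvBwd_eq ag n hn]
      have hG : (List.range n.toNat).map (pvGrow ag n)
          = (List.range n.toNat).map (fun (i : Nat) => (List.range n.toNat).map (fun (j : Nat) => pvDmin ag ((i : Int), (j : Int)))) := by
        apply List.map_congr_left; intro x hx
        rw [List.mem_range] at hx
        unfold pvGrow
        apply List.map_congr_left; intro y hy
        rw [List.mem_range] at hy
        exact pvG_eq_dmin ag n h2 hgrid x y hx hy
      rw [hG]
      set M := pvMax ag (pvGrid n) with hM
      set rowsD := (List.range n.toNat).map (fun (i : Nat) => (List.range n.toNat).map (fun (j : Nat) => pvDmin ag ((i : Int), (j : Int)))) with hrows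
      set bst := (PySem.List.max? (rowsD.map (fun row => (PySem.List.max? row (fun x => x)).getD 0)) (fun x => x)).getD 0 with hbst
      have hNpos : 0 < n.toNat := by omega
      have hfil_ne : (pvGrid n).filter (fun c => !(PySem.Set.contains ag c)) ≠ [] := by
        intro hfil
        apply hful
        rw [pvLen_eq]
        exact_mod_cast (pvFull_iff agents n (le_of_lt hn)).mp (hagdef ▸ hfil)
      obtain ⟨c₀, hc₀⟩ := List.exists_mem_of_ne_nil _ hfil_ne
      have hc₀g : c₀ ∈ pvGrid n := (List.mem_filter.mp hc₀).1
      have hc₀f : c₀ ∉ ag := by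
        have := (List.mem_filter.mp hc₀).2; simpa using this
      have hM1 : 1 ≤ M :=
        le_trans (pvDmin_pos ag h2 c₀ hc₀f) (pvMax_bound ag (pvGrid n) c₀ hc₀)
      -- bst is attained on the grid and bounds every grid cell's pvDmin
      have houter := pvMaxD_spec (rowsD.map (fun row => (PySem.List.max? row (fun x => x)).getD 0))
        (by rw [hrows]; simp [List.range_eq_nil]; omega)
      have hex : ∃ c ∈ pvGrid n, bst = pvDmin ag c := by
        obtain ⟨row, hrow, hre⟩ := List.mem_map.mp houter.1
        rw [hrows] at hrow
        obtain ⟨i, hi, rfl⟩ := List.mem_map.mp hrow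
        rw [List.mem_range] at hi
        have hinner := pvMaxD_spec ((List.range n.toNat).map (fun (j : Nat) => pvDmin ag ((i : Int), (j : Int))))
          (by simp [List.range_eq_nil]; omega)
        obtain ⟨j, hj, hje⟩ := List.mem_map.mp hinner.1
        rw [List.mem_range] at hj
        refine ⟨((i : Int), (j : Int)), (pvGrid_mem n _).mpr ⟨by omega, by omega, by omega, by omega⟩, ?_⟩
        exact (hje.trans hre).symm
      have hallb : ∀ c ∈ pvGrid n, pvDmin ag c ≤ bst := by
        intro c hc
        obtain ⟨b1, b2, b3, b4⟩ := (pvGrid_mem n c).mp hc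
        have hcc : ((c.1.toNat : Int), (c.2.toNat : Int)) = c := by
          obtain ⟨a, b⟩ := c
          simp only [Prod.mk.injEq]
          exact ⟨by omega, by omega⟩
        have hi' : c.1.toNat ∈ List.range n.toNat := by rw [List.mem_range]; omega
        have hj' : c.2.toNat ∈ List.range n.toNat := by rw [List.mem_range]; omega
        have hrowmem : (List.range n.toNat).map (fun (j : Nat) => pvDmin ag ((c.1.toNat : Int), (j : Int))) ∈ rowsD := by
          rw [hrows]
          exact List.mem_map_of_mem hi'
        have hcell : pvDmin ag c ∈ (List.range n.toNat).map (fun (j : Nat) => pvDmin ag ((c.1.toNat : Int), (j : Int))) := by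
          have := List.mem_map_of_mem (f := fun j : Nat => pvDmin ag ((c.1.toNat : Int), (j : Int))) hj'
          simp only at this
          rwa [hcc] at this
        have h1 := (pvMaxD_spec ((List.range n.toNat).map (fun (j : Nat) => pvDmin ag ((c.1.toNat : Int), (j : Int))))
          (by simp [List.range_eq_nil]; omega)).2 _ hcell
        have h2 := houter.2 _ (List.mem_map_of_mem (f := fun row => (PySem.List.max? row (fun x => x)).getD 0) hrowmem)
        exact le_trans h1 h2
      have hbestM : bst = M := by
        obtain ⟨c, hcg, hce⟩ := hex
        have le1 : bst ≤ M := by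
          by_cases hcag : c ∈ ag
          · rw [hce, pvDmin_zero ag c hcag]; omega
          · have hcf : c ∈ (pvGrid n).filter (fun c => !(PySem.Set.contains ag c)) :=
              List.mem_filter.mpr ⟨hcg, by simpa using hcag⟩
            rw [hce]
            exact pvMax_bound ag (pvGrid n) c hcf
        have le2 : M ≤ bst := by
          have hMfold : M = (((pvGrid n).filter (fun c => !(PySem.Set.contains ag c))).map (pvDmin ag)).foldl max (-1) := by
            rw [hM, pvMax, List.foldl_map]
          rcases PySem.List.foldl_max_mem (((pvGrid n).filter (fun c => !(PySem.Set.contains ag c))).map (pvDmin ag)) (-1) with h | h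
          · rw [← hMfold] at h; omega
          · rw [← hMfold] at h
            obtain ⟨c', hc', he'⟩ := List.mem_map.mp h
            have hc'g : c' ∈ pvGrid n := (List.mem_filter.mp hc').1
            rw [← he']
            exact hallb c' hc'g
        omega
      -- turn B's comprehension into a filter of the row-major grid
      rw [← List.filter_flatMap]
      rw [show ((PySem.List.pyRange 0 n 1).flatMap (fun i => (PySem.List.pyRange 0 n 1).map (fun j => (i, j)))) = pvGrid n from rfl]
      have hpred : ∀ c ∈ pvGrid n,
          (PySem.List.pyGetD (PySem.List.pyGetD rowsD c.1 []) c.2 0 == bst) = decide (pvDmin ag c = M) := by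
        intro c hc
        obtain ⟨b1, b2, b3, b4⟩ := (pvGrid_mem n c).mp hc
        have e1 : c.1 = ((c.1.toNat : Nat) : Int) := by omega
        have e2 : c.2 = ((c.2.toNat : Nat) : Int) := by omega
        have hcc : ((c.1.toNat : Int), (c.2.toNat : Int)) = c := by
          obtain ⟨a, b⟩ := c
          simp only [Prod.mk.injEq]
          exact ⟨by omega, by omega⟩
        rw [hrows]
        rw [e1, e2]
        rw [pvGetD_map_range _ n.toNat c.1.toNat (by omega)]
        rw [pvGetD_map_range _ n.toNat c.2.toNat (by omega)]
        rw [hcc, hbestM]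
        by_cases hdm : pvDmin ag c = M <;> simp [hdm]
      rw [List.filter_congr hpred]
      rw [if_neg h2]
      -- and A's result into the same filter
      show ((pvGrid n).filter (fun c => !(PySem.Set.contains ag c))).filter (fun c => decide (pvDmin ag c = M))
        = (pvGrid n).filter (fun c => decide (pvDmin ag c = M))
      rw [List.filter_filter]
      apply List.filter_congr
      intro c hc
      by_cases hcag : c ∈ ag
      · have h0 := pvDmin_zero ag c hcag
        have : ¬ (pvDmin ag c = M) := by omega
        simp [this]
      · simp [hcag]
      

-- ===== VERDICT (by name: the statement is the Claim_ definition above) =====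
theorem advice_spec : Claim_equal_advice := by
  intro agents n _
  unfold Spec_advice
  exact advice_eq agents n
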